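-- pv_equiv track=rewrite | github.com/mlldzi/fefu | cats/oaip/semester 1/F1 Elite number/solve.py | skip
-- ===== SOURCE A (Python) =====
-- def correct(num, index):
--     num = list(str(num))
--     f = "".join(num[0:index])
--     s = str(int(num[index]) + 1)
--     t = len(num[index + 1:])
--     t *= "1"
--     return f + s + t
--
-- def skip(num):
--     number = list(str(num))
--     flag_even = False
--     flag_zero = False
--     flag_five = False
--     for i in range(len(number)):
--         if number[i] == "0":
--             flag_zero = True
--         if number[i] in ("2", "4", "6", "8"):
--             flag_even = True
--         if number[i] == "5":
--             flag_five = True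
--         if (flag_five and flag_even) or flag_zero:
--             num = int(correct(num, i))
--             break
--     return num
-- ===== SOURCE B (Python) =====
-- def correct(num, index):
--     num = list(str(num))
--     f = "".join(num[0:index])
--     s = str(int(num[index]) + 1)
--     t = len(num[index + 1:])
--     t *= "1"
--     return f + s + t
--
-- def skip(num):
--     s = str(num)
--     n = len(s)
--     first_zero = next((i for i, c in enumerate(s) if c == "0"), n)
--     first_even = next((i for i, c in enumerate(s) if c in "2468"), n)
--     first_five = next((i for i, c in enumerate(s) if c == "5"), n)
--     trig = min(first_zero, max(first_five, first_even))
--     if trig < n: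
--         return int(correct(num, trig))
--     return num
-- ===== Notes on version B (the rewrite author's own statement) =====
-- stated objective: simpler
-- what changed: Replaces A's single flag-tracking loop with break by three independent first-occurrence searches over the digit string, combining them as min(first_zero, max(first_five, first_even)) to get the trigger index directly.
import Mathlib
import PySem

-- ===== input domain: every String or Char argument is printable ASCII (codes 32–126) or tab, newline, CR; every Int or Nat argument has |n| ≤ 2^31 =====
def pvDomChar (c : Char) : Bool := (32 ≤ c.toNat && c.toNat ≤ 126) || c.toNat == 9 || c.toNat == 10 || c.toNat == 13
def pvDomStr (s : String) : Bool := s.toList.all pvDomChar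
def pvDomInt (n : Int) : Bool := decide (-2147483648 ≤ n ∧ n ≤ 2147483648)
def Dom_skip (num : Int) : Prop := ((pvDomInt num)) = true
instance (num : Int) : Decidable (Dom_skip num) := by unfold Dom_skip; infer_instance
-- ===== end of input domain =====

-- B replaces A's flag-tracking loop by three independent first-occurrence searches combined
-- as min(first_zero, max(first_five, first_even)); objective: simpler decomposition (no speed claim).

-- ===== PORT A =====
-- shared helper `correct` (identical in Source A and Source B); works on List Char, joined/parsed at the end.
-- `index` is the loop counter, always in range at every call site (so the `getD`/`getD 0` defaults never fire).
def correctChars (num : Int) (index : Nat) : List Char :=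
  let numL := PySem.Int.toChars num
  let f := PySem.List.slice numL (some 0) (some (index : Int))
  let s := PySem.Int.toChars ((PySem.Int.ofChars? [numL.getD index ' ']).getD 0 + 1)
  let t := List.replicate (numL.drop (index + 1)).length '1'
  f ++ s ++ t

-- int(correct(num, index)) — the parse always succeeds at call sites (sign then digits), default unused.
def intCorrect (num : Int) (index : Nat) : Int :=
  (PySem.Int.ofChars? (correctChars num index)).getD 0

-- A's for-loop over the digit characters, carrying the three flags and the index.
def skipLoop (num : Int) (l : List Char) (i : Nat) (fe fz ff : Bool) : Int :=
  match l with
  | [] => num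
  | c :: rest =>
    let fz := fz || (c == '0')
    let fe := fe || (c == '2' || c == '4' || c == '6' || c == '8')
    let ff := ff || (c == '5')
    if (ff && fe) || fz then intCorrect num i
    else skipLoop num rest (i + 1) fe fz ff

def skip (num : Int) : Int :=
  skipLoop num (PySem.Int.toChars num) 0 false false false

-- ===== PORT B =====
def isEvenDigit (c : Char) : Bool := c == '2' || c == '4' || c == '6' || c == '8'

def skip_alt (num : Int) : Int :=
  let s := PySem.Int.toChars num
  let n := s.length
  let firstZero := (s.findIdx? (· == '0')).getD n
  let firstEven := (s.findIdx? isEvenDigit).getD n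
  let firstFive := (s.findIdx? (· == '5')).getD n
  let trig := min firstZero (max firstFive firstEven)
  if trig < n then intCorrect num trig else num

-- ===== PRECONDITION & SPEC =====
def Spec_skip (num : Int) (out : Int) : Prop := out = skip_alt num
instance (num : Int) (out : Int) : Decidable (Spec_skip num out) := by unfold Spec_skip; infer_instance

-- ===== CLAIM (what is proved, stated in full; the proofs are below) =====
def Claim_equal_skip : Prop := ∀ (num : Int), Dom_skip num → Spec_skip num (skip num)

-- ===== LEMMAS AND PROOFS =====

-- first index satisfying p, with the list's length as "not found"
def fIdx (l : List Char) (p : Char → Bool) : Nat := (l.findIdx? p).getD l.length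

theorem fIdx_cons (c : Char) (rest : List Char) (p : Char → Bool) :
    fIdx (c :: rest) p = if p c then 0 else fIdx rest p + 1 := by
  simp only [fIdx, List.findIdx?_cons]
  by_cases h : p c
  · simp [h]
  · simp only [h, List.length_cons]
    cases hr : List.findIdx? p rest <;> simp

-- the trigger index of the loop, given the incoming flags (0-part if a flag is already set)
def tri (l : List Char) (fe fz ff : Bool) : Nat :=
  min (if fz then 0 else fIdx l (· == '0'))
    (max (if ff then 0 else fIdx l (· == '5')) (if fe then 0 else fIdx l isEvenDigit))

theorem skipLoop_eq (l : List Char) : ∀ (num : Int) (i : Nat) (fe fz ff : Bool),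
    skipLoop num l i fe fz ff =
      if tri l fe fz ff < l.length then intCorrect num (i + tri l fe fz ff) else num := by
  induction l with
  | nil =>
    intro num i fe fz ff
    simp [skipLoop, tri]
  | cons c rest ih =>
    intro num i fe fz ff
    have hc : tri (c :: rest) fe fz ff =
        if (ff || (c == '5')) && (fe || (c == '2' || c == '4' || c == '6' || c == '8'))
            || (fz || (c == '0')) then 0
        else tri rest (fe || (c == '2' || c == '4' || c == '6' || c == '8'))
              (fz || (c == '0')) (ff || (c == '5')) + 1 := by
      simp only [tri, fIdx_cons, isEvenDigit]
      by_cases h0 : c == '0' <;> by_cases h5 : c == '5' <;>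
        by_cases he : (c == '2' || c == '4' || c == '6' || c == '8') <;>
        cases fe <;> cases fz <;> cases ff <;>
        simp_all
    by_cases h : ((ff || (c == '5')) && (fe || (c == '2' || c == '4' || c == '6' || c == '8'))
        || (fz || (c == '0'))) = true
    · simp only [skipLoop, h, if_true, hc, List.length_cons]
      simp
    · have hb := eq_false_of_ne_true h
      simp only [skipLoop, hb, hc, Bool.false_eq_true, if_false, List.length_cons]
      rw [ih]
      by_cases hlt : tri rest (fe || (c == '2' || c == '4' || c == '6' || c == '8'))
          (fz || (c == '0')) (ff || (c == '5')) < rest.length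
      · rw [if_pos hlt, if_pos (by omega)]
        congr 1
        omega
      · rw [if_neg hlt, if_neg (by omega)]

-- ===== VERDICT (by name: the statement is the Claim_ definition above) =====
theorem skip_spec : Claim_equal_skip := by
  intro num _
  show skip num = skip_alt num
  rw [skip, skipLoop_eq]
  simp [skip_alt, tri, fIdx]
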